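-- pv_equiv track=rewrite | github.com/evan-anderson/Google-foobar | Level 3/queue_to_do_solution.py | answer
-- ===== SOURCE A (Python) =====
-- def answer(start, length):
--     '''
--     Args:
--     start (int): ID number of first worker checked
--     length (int): line capacity
--
--     Return:
--     checksum (int): checksum value for security check
--     '''
--
--     # initialize the list of IDs I'll end up checksumming
--     checklist=[]
--
--     # create the list of all numbers I'll be checksumming
--     # the first part of the list is start to start + length -1
--     # the next part of the list is start+length to start+length -2
--     # and so on until we reach the line length
--     for i in range(0,length):
--         checklist.extend(list(range(start+i*length, start+i*length + length- i)))
--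
--     #initialize the checksum
--     checksum=checklist[0]
--
--     #sequentially checksum each id in the list
--     for x in checklist[1:]:
--         checksum=checksum^x
--     return checksum
-- ===== SOURCE B (Python) =====
-- def _xor_upto(n):
--     # XOR of 0..n for n >= 0 (classic n % 4 table); 0 for n < 0
--     if n < 0:
--         return 0
--     return (n, 1, n + 1, 0)[n % 4]
--
--
-- def _rxor_nn(a, b):
--     # XOR of range(a, b) with 0 <= a
--     if a >= b:
--         return 0
--     return _xor_upto(b - 1) ^ _xor_upto(a - 1)
--
--
-- def _rxor_neg(a, b):
--     # XOR of range(a, b) with a < b <= 0: the complements ~x of the values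
--     # are exactly range(-b, -a), and XOR-ing k complemented values flips the
--     # result iff k is odd
--     r = _rxor_nn(-b, -a)
--     return r if (b - a) % 2 == 0 else ~r
--
--
-- def _rxor(a, b):
--     # XOR of range(a, b) for arbitrary ints, in O(1)
--     if a >= b:
--         return 0
--     if a >= 0:
--         return _rxor_nn(a, b)
--     if b <= 0:
--         return _rxor_neg(a, b)
--     return _rxor_neg(a, 0) ^ _rxor_nn(0, b)
--
--
-- def answer(start, length):
--     checksum = 0
--     for i in range(length):
--         row = start + i * length
--         checksum ^= _rxor(row, row + length - i)
--     return checksum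
-- ===== Notes on version B (the rewrite author's own statement) =====
-- stated objective: faster
-- what changed: Instead of materialising every ID of every row into one big list and XOR-ing them element by element, B computes the XOR of each row's range in O(1) with the closed-form XOR-of-0..n-by-n%4 formula (extended to negative ranges via complements), XOR-ing one value per row.
import Mathlib
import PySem

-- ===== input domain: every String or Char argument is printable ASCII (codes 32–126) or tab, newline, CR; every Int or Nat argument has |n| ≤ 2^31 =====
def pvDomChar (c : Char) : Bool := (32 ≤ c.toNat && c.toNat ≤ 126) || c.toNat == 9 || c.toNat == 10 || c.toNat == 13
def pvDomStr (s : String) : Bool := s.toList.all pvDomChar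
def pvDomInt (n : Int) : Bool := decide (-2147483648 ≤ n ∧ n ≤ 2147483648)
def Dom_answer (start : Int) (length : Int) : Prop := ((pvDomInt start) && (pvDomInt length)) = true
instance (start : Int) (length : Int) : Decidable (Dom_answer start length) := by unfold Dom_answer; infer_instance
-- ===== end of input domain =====

-- B replaces A's O(length^2) "materialise every ID then XOR them one by one" with a closed-form
-- XOR over each row's range (the classic XOR-of-0..n-by-n%4 formula), O(length) total.

-- ===== PORT A =====
def answer (start : Int) (length : Int) : Int :=
  let checklist := (PySem.List.pyRange 0 length).foldl
    (fun acc i => acc ++ PySem.List.pyRange (start + i * length) (start + i * length + length - i)) []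
  -- checklist[0]: IndexError when checklist is empty (length <= 0); excluded by Pre_answer
  let checksum := (PySem.List.pyGet? checklist 0).getD 0
  (PySem.List.slice checklist (some 1) none).foldl PySem.Int.bxor checksum

-- ===== PORT B =====
-- XOR of 0..n for n >= 0 (n % 4 table); 0 for n < 0
def xorUpto (n : Int) : Int :=
  if n < 0 then 0
  else
    let m := PySem.Int.mod n 4
    if m = 0 then n else if m = 1 then 1 else if m = 2 then n + 1 else 0

-- XOR of range(a, b) with 0 <= a
def rxorNN (a b : Int) : Int :=
  if b ≤ a then 0 else PySem.Int.bxor (xorUpto (b - 1)) (xorUpto (a - 1))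

-- XOR of range(a, b) with a < b <= 0, via complements  (~r is -r-1)
def rxorNeg (a b : Int) : Int :=
  let r := rxorNN (-b) (-a)
  if PySem.Int.mod (b - a) 2 = 0 then r else -r - 1

-- XOR of range(a, b) for arbitrary ints, in O(1)
def rxor (a b : Int) : Int :=
  if b ≤ a then 0
  else if 0 ≤ a then rxorNN a b
  else if b ≤ 0 then rxorNeg a b
  else PySem.Int.bxor (rxorNeg a 0) (rxorNN 0 b)

def answer_alt (start : Int) (length : Int) : Int :=
  (PySem.List.pyRange 0 length).foldl
    (fun checksum i =>
      PySem.Int.bxor checksum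
        (rxor (start + i * length) (start + i * length + length - i))) 0

-- ===== PRECONDITION & SPEC =====
-- Pre_ excludes length <= 0, on which A's checklist[0] raises IndexError.
def Pre_answer (start : Int) (length : Int) : Prop := 1 ≤ length
instance (start : Int) (length : Int) : Decidable (Pre_answer start length) := by
  unfold Pre_answer; infer_instance

def pvWitness_answer : Int × Int := (17, 4)

def Spec_answer (start : Int) (length : Int) (out : Int) : Prop := out = answer_alt start length
instance (start : Int) (length : Int) (out : Int) : Decidable (Spec_answer start length out) := by
  unfold Spec_answer; infer_instance

-- ===== CLAIM (what is proved, stated in full; the proofs are below) =====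
def Claim_equal_answer : Prop := ∀ (start : Int) (length : Int), Dom_answer start length →
  Pre_answer start length → Spec_answer start length (answer start length)

-- ===== LEMMAS AND PROOFS =====

-- XOR-fold of a list of Ints
def pvF (l : List Int) : Int := l.foldl PySem.Int.bxor 0

-- sign/magnitude view of an Int: pvEnc false m = m, pvEnc true m = ~m = -m-1
def pvEnc (s : Bool) (m : Nat) : Int := if s then -(m : Int) - 1 else (m : Int)

theorem pvEnc_surj (x : Int) : ∃ s m, x = pvEnc s m := by
  by_cases h : 0 ≤ x
  · exact ⟨false, x.toNat, by simp only [pvEnc, Bool.false_eq_true, if_false]; omega⟩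
  · exact ⟨true, (-x - 1).toNat, by simp only [pvEnc, if_true]; omega⟩

theorem bxor_enc (s t : Bool) (a b : Nat) :
    PySem.Int.bxor (pvEnc s a) (pvEnc t b) = pvEnc (s != t) (a ^^^ b) := by
  cases s <;> cases t <;>
    simp only [pvEnc, bne_self_eq_false, Bool.false_bne, Bool.true_bne, Bool.bne_false,
      Bool.bne_true, Bool.not_false, Bool.not_true, Bool.false_eq_true, if_true, if_false,
      PySem.Int.bxor]
  · rw [if_pos (Int.natCast_nonneg a), if_pos (Int.natCast_nonneg b),
        Int.toNat_natCast, Int.toNat_natCast]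
  · rw [if_pos (Int.natCast_nonneg a), if_neg (by omega),
        show -(-(b : Int) - 1) - 1 = (b : Int) by ring, Int.toNat_natCast, Int.toNat_natCast]
  · rw [if_neg (by omega), if_pos (Int.natCast_nonneg b),
        show -(-(a : Int) - 1) - 1 = (a : Int) by ring, Int.toNat_natCast, Int.toNat_natCast]
  · rw [if_neg (by omega), if_neg (by omega),
        show -(-(a : Int) - 1) - 1 = (a : Int) by ring,
        show -(-(b : Int) - 1) - 1 = (b : Int) by ring, Int.toNat_natCast, Int.toNat_natCast]

theorem bxor_assoc (x y z : Int) :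
    PySem.Int.bxor (PySem.Int.bxor x y) z = PySem.Int.bxor x (PySem.Int.bxor y z) := by
  obtain ⟨sx, mx, rfl⟩ := pvEnc_surj x
  obtain ⟨sy, my, rfl⟩ := pvEnc_surj y
  obtain ⟨sz, mz, rfl⟩ := pvEnc_surj z
  rw [bxor_enc, bxor_enc, bxor_enc, bxor_enc, Nat.xor_assoc]
  cases sx <;> cases sy <;> cases sz <;> rfl

theorem zero_bxor (a : Int) : PySem.Int.bxor 0 a = a := by
  rw [PySem.Int.bxor_comm, PySem.Int.bxor_zero]

theorem bxor_neg_one (x : Int) : PySem.Int.bxor x (-1) = -1 - x := by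
  obtain ⟨s, m, rfl⟩ := pvEnc_surj x
  have h : (-1 : Int) = pvEnc true 0 := by simp [pvEnc]
  rw [h, bxor_enc]
  cases s <;> simp [pvEnc] <;> omega

theorem bxor_cancel_left (a b : Int) :
    PySem.Int.bxor a (PySem.Int.bxor a b) = b := by
  rw [← bxor_assoc, PySem.Int.bxor_self, zero_bxor]

theorem foldl_bxor (l : List Int) (acc : Int) :
    l.foldl PySem.Int.bxor acc = PySem.Int.bxor acc (pvF l) := by
  induction l generalizing acc with
  | nil => simp [pvF, PySem.Int.bxor_zero]
  | cons x xs ih =>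
    simp only [pvF, List.foldl_cons] at *
    rw [ih, ih (PySem.Int.bxor 0 x), zero_bxor, bxor_assoc]

theorem pvF_cons (x : Int) (l : List Int) :
    pvF (x :: l) = PySem.Int.bxor x (pvF l) := by
  simp only [pvF, List.foldl_cons, zero_bxor]
  exact foldl_bxor l x

theorem pvF_append (xs ys : List Int) :
    pvF (xs ++ ys) = PySem.Int.bxor (pvF xs) (pvF ys) := by
  simp only [pvF, List.foldl_append]
  exact foldl_bxor ys _

-- XOR of 0..n-1 by n % 4
def natP (n : Nat) : Nat :=
  match n % 4 with
  | 0 => 0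
  | 1 => n - 1
  | 2 => 1
  | _ => n

theorem natP_spec (n : Nat) : (List.range n).foldl (· ^^^ ·) 0 = natP n := by
  cases n with
  | zero => simp [natP]
  | succ m =>
    rw [Nat.xor_range m]
    have h4 : m % 4 = 0 ∨ m % 4 = 1 ∨ m % 4 = 2 ∨ m % 4 = 3 := by omega
    have hv : (Fin.ofNat 4 m).val = m % 4 := Fin.val_ofNat ..
    have hnp : natP (m + 1) = match (m + 1) % 4 with
        | 0 => 0 | 1 => (m + 1) - 1 | 2 => 1 | _ => m + 1 := rfl
    rcases h4 with h | h | h | h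
    · have hf : Fin.ofNat 4 m = (0 : Fin 4) := by apply Fin.ext; rw [hv, h]; rfl
      have h1 : (m + 1) % 4 = 1 := by omega
      rw [hf, hnp, h1]
      show m = m + 1 - 1
      omega
    · have hf : Fin.ofNat 4 m = (1 : Fin 4) := by apply Fin.ext; rw [hv, h]; rfl
      have h1 : (m + 1) % 4 = 2 := by omega
      rw [hf, hnp, h1]
    · have hf : Fin.ofNat 4 m = (2 : Fin 4) := by apply Fin.ext; rw [hv, h]; rfl
      have h1 : (m + 1) % 4 = 3 := by omega
      rw [hf, hnp, h1]
    · have hf : Fin.ofNat 4 m = (3 : Fin 4) := by apply Fin.ext; rw [hv, h]; rfl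
      have h1 : (m + 1) % 4 = 0 := by omega
      rw [hf, hnp, h1]

theorem foldl_bxor_natCast (l : List Nat) (a : Nat) :
    (l.map (fun x : Nat => (x : Int))).foldl PySem.Int.bxor (a : Int)
      = ((l.foldl (· ^^^ ·) a : Nat) : Int) := by
  induction l generalizing a with
  | nil => rfl
  | cons x xs ih => rw [List.map_cons, List.foldl_cons, PySem.Int.bxor_natCast, ih, List.foldl_cons]

theorem pvF_range0 (n : Nat) : pvF (PySem.List.pyRange 0 (n : Int)) = ((natP n : Nat) : Int) := by
  rw [PySem.List.pyRange_zero_natCast, pvF,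
      show (0 : Int) = ((0 : Nat) : Int) from rfl, foldl_bxor_natCast, natP_spec]

theorem pyRange_nil {a b : Int} (h : b ≤ a) : PySem.List.pyRange a b = [] := by
  simp [PySem.List.pyRange, show ¬ (a < b) by omega]

theorem xorUpto_eq (k : Int) (h : -1 ≤ k) :
    xorUpto k = pvF (PySem.List.pyRange 0 (k + 1)) := by
  rcases eq_or_lt_of_le h with h' | h'
  · rw [← h']
    simp [xorUpto, pyRange_nil (by omega : (-1 : Int) + 1 ≤ 0), pvF]
  · have hk : 0 ≤ k := by omega
    obtain ⟨m, rfl⟩ := Int.eq_ofNat_of_zero_le hk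
    have hcast : ((m : Int) + 1) = ((m + 1 : Nat) : Int) := by push_cast; ring
    rw [hcast, pvF_range0]
    have hmod : PySem.Int.mod (m : Int) 4 = ((m % 4 : Nat) : Int) := PySem.Int.mod_natCast m 4
    have h4 : m % 4 = 0 ∨ m % 4 = 1 ∨ m % 4 = 2 ∨ m % 4 = 3 := by omega
    rcases h4 with h | h | h | h <;>
      simp [xorUpto, hmod, h, natP, Nat.add_mod m 1 4, show ¬ ((m : Int) < 0) by omega] <;>
      omega

theorem rxorNN_eq (a b : Int) (ha : 0 ≤ a) :
    rxorNN a b = pvF (PySem.List.pyRange a b) := by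
  by_cases hab : b ≤ a
  · simp [rxorNN, hab, pyRange_nil hab, pvF]
  · have hab' : a ≤ b := by omega
    rw [rxorNN, if_neg hab]
    rw [xorUpto_eq (b - 1) (by omega), xorUpto_eq (a - 1) (by omega)]
    have e1 : b - 1 + 1 = b := by ring
    have e2 : a - 1 + 1 = a := by ring
    rw [e1, e2]
    have happ := PySem.List.pyRange_one_append 0 a b ha hab'
    have : pvF (PySem.List.pyRange 0 b)
        = PySem.Int.bxor (pvF (PySem.List.pyRange 0 a)) (pvF (PySem.List.pyRange a b)) := by
      rw [happ, pvF_append]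
    rw [this, PySem.Int.bxor_comm, bxor_cancel_left]

theorem pvF_neg (n : Nat) : ∀ a b : Int, (b - a).toNat = n → a ≤ b → b ≤ 0 →
    pvF (PySem.List.pyRange a b) =
      (if (b - a) % 2 = 0 then pvF (PySem.List.pyRange (-b) (-a))
       else -1 - pvF (PySem.List.pyRange (-b) (-a))) := by
  induction n with
  | zero =>
    intro a b hn hab _
    have : a = b := by omega
    subst this
    simp [pyRange_nil (le_refl a), pvF]
  | succ n ih =>
    intro a b hn hab hb
    have hlt : a < b := by omega
    have hih := ih (a + 1) b (by omega) (by omega) hb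
    rw [show -(a + 1) = -a - 1 by ring] at hih
    rw [PySem.List.pyRange_one_cons hlt, pvF_cons, hih]
    have hsr : PySem.List.pyRange (-b) (-a)
        = PySem.List.pyRange (-b) (-a - 1) ++ [-a - 1] := by
      have := PySem.List.pyRange_one_succ_right (a := -b) (b := -a - 1) (by omega)
      simpa [show -a - 1 + 1 = -a by ring] using this
    have hone : pvF [(-a - 1 : Int)] = -a - 1 := by
      simp [pvF, zero_bxor]
    have hY : pvF (PySem.List.pyRange (-b) (-a))
        = PySem.Int.bxor (pvF (PySem.List.pyRange (-b) (-a - 1))) (-a - 1) := by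
      rw [hsr, pvF_append, hone]
    set Y := pvF (PySem.List.pyRange (-b) (-a - 1)) with hYdef
    by_cases hpar : (b - a) % 2 = 0
    · have hpar' : ¬ ((b - (a + 1)) % 2 = 0) := by omega
      rw [if_pos hpar, if_neg hpar', hY]
      rw [show (-1 : Int) - Y = PySem.Int.bxor Y (-1) from (bxor_neg_one Y).symm]
      rw [← bxor_assoc, PySem.Int.bxor_comm a Y, bxor_assoc, bxor_neg_one a,
          show (-1 : Int) - a = -a - 1 by ring]
    · have hpar' : (b - (a + 1)) % 2 = 0 := by omega
      rw [if_neg hpar, if_pos hpar', hY]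
      rw [show (-1 : Int) - PySem.Int.bxor Y (-a - 1)
            = PySem.Int.bxor (PySem.Int.bxor Y (-a - 1)) (-1) from (bxor_neg_one _).symm]
      rw [bxor_assoc, bxor_neg_one (-a - 1), show (-1 : Int) - (-a - 1) = a by ring,
          PySem.Int.bxor_comm Y a]

theorem rxorNeg_eq (a b : Int) (hab : a ≤ b) (hb : b ≤ 0) :
    rxorNeg a b = pvF (PySem.List.pyRange a b) := by
  rw [pvF_neg (b - a).toNat a b rfl hab hb, rxorNeg]
  rw [rxorNN_eq (-b) (-a) (by omega), PySem.Int.mod_eq_emod_of_pos (by omega)]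
  split_ifs with hp
  · rfl
  · ring

theorem rxor_eq (a b : Int) : rxor a b = pvF (PySem.List.pyRange a b) := by
  rw [rxor]
  by_cases h1 : b ≤ a
  · simp [h1, pyRange_nil h1, pvF]
  rw [if_neg h1]
  by_cases h2 : 0 ≤ a
  · rw [if_pos h2, rxorNN_eq a b h2]
  rw [if_neg h2]
  by_cases h3 : b ≤ 0
  · rw [if_pos h3, rxorNeg_eq a b (by omega) h3]
  rw [if_neg h3]
  have happ := PySem.List.pyRange_one_append a 0 b (by omega) (by omega)
  rw [happ, pvF_append, rxorNeg_eq a 0 (by omega) (le_refl 0), rxorNN_eq 0 b (le_refl 0)]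

theorem pvF_flatMap (row : Int → List Int) (l : List Int) :
    pvF (List.flatMap row l) = pvF (l.map fun i => pvF (row i)) := by
  induction l with
  | nil => rfl
  | cons x xs ih =>
    rw [List.flatMap_cons, pvF_append, ih, List.map_cons, pvF_cons]

theorem slice_fold_head (y : Int) (l : List Int) :
    (PySem.List.slice (y :: l) (some 1) none).foldl PySem.Int.bxor
      ((PySem.List.pyGet? (y :: l) 0).getD 0) = pvF (y :: l) := by
  rw [PySem.List.slice_from (y :: l) (by omega : (0 : Int) ≤ 1)]
  have hget : (PySem.List.pyGet? (y :: l) 0).getD 0 = y := by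
    simp [PySem.List.pyGet?, PySem.List.pyIdx?]
  rw [hget, show ((1 : Int)).toNat = 1 from rfl, List.drop_one, List.tail_cons, pvF_cons]
  exact foldl_bxor l y

theorem answer_eq_pvF (start len : Int) (h : 1 ≤ len) :
    answer start len =
      pvF ((PySem.List.pyRange 0 len).foldl
        (fun acc i => acc ++ PySem.List.pyRange (start + i * len) (start + i * len + len - i)) []) := by
  have hdef : answer start len
      = (PySem.List.slice ((PySem.List.pyRange 0 len).foldl
            (fun acc i => acc ++ PySem.List.pyRange (start + i * len) (start + i * len + len - i)) [])
          (some 1) none).foldl PySem.Int.bxor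
          ((PySem.List.pyGet? ((PySem.List.pyRange 0 len).foldl
            (fun acc i => acc ++ PySem.List.pyRange (start + i * len) (start + i * len + len - i)) [])
            0).getD 0) := rfl
  have hfl : (PySem.List.pyRange 0 len).foldl
      (fun acc i => acc ++ PySem.List.pyRange (start + i * len) (start + i * len + len - i)) []
      = List.flatMap (fun i => PySem.List.pyRange (start + i * len) (start + i * len + len - i))
          (PySem.List.pyRange 0 len) := by
    simpa using PySem.List.foldl_append_eq_flatMap
      (fun i => PySem.List.pyRange (start + i * len) (start + i * len + len - i))
      (PySem.List.pyRange 0 len) []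
  have hcons : PySem.List.pyRange 0 len = 0 :: PySem.List.pyRange 1 len :=
    PySem.List.pyRange_one_cons (by omega)
  have hrow0 : PySem.List.pyRange (start + 0 * len) (start + 0 * len + len - 0)
      = start :: PySem.List.pyRange (start + 1) (start + 0 * len + len - 0) := by
    rw [show start + 0 * len = start by ring]
    exact PySem.List.pyRange_one_cons (by omega)
  have hck : List.flatMap (fun i => PySem.List.pyRange (start + i * len) (start + i * len + len - i))
        (PySem.List.pyRange 0 len)
      = start :: (PySem.List.pyRange (start + 1) (start + 0 * len + len - 0)
          ++ List.flatMap (fun i => PySem.List.pyRange (start + i * len) (start + i * len + len - i))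
              (PySem.List.pyRange 1 len)) := by
    rw [hcons, List.flatMap_cons, hrow0]; rfl
  rw [hdef, hfl, hck, slice_fold_head]

-- ===== VERDICT (by name: the statement is the Claim_ definition above) =====
theorem answer_spec : Claim_equal_answer := by
  intro start len _ hpre
  unfold Spec_answer
  rw [answer_eq_pvF start len hpre]
  have hfl : (PySem.List.pyRange 0 len).foldl
      (fun acc i => acc ++ PySem.List.pyRange (start + i * len) (start + i * len + len - i)) []
      = List.flatMap (fun i => PySem.List.pyRange (start + i * len) (start + i * len + len - i))
          (PySem.List.pyRange 0 len) := by
    simpa using PySem.List.foldl_append_eq_flatMap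
      (fun i => PySem.List.pyRange (start + i * len) (start + i * len + len - i))
      (PySem.List.pyRange 0 len) []
  rw [hfl, pvF_flatMap, answer_alt]
  simp only [← rxor_eq]
  rw [pvF, List.foldl_map]
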